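-- pv_equiv track=rewrite | github.com/eugenegold7411/bullbearbot | annex/thesis_ecology.py | _detect_symbol_collisions
-- ===== SOURCE A (Python) =====
-- def _detect_symbol_collisions(active_positions: list, thesis_checksums: list) -> tuple[bool, bool]:
--     """
--     Returns (same_symbol_different_thesis, competing_direction).
--     """
--     symbol_theses: dict = {}
--     for pos in active_positions:
--         if not isinstance(pos, dict):
--             continue
--         sym = pos.get("symbol", "")
--         t = pos.get("thesis_type", pos.get("thesis", ""))
--         direction = str(pos.get("direction", pos.get("side", "")) or "").lower()
--         if sym:
--             symbol_theses.setdefault(sym, []).append({"thesis": t, "direction": direction})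
--
--     # Also check checksums
--     for cs in thesis_checksums:
--         if not isinstance(cs, dict):
--             continue
--         sym = cs.get("symbol", "")
--         t = cs.get("thesis_type", "")
--         if sym and t and cs.get("thesis_verdict", "pending") != "closed":
--             symbol_theses.setdefault(sym, []).append({"thesis": t, "direction": ""})
--
--     same_sym_diff = False
--     competing = False
--     for sym, entries in symbol_theses.items():
--         theses = [e["thesis"] for e in entries if e["thesis"]]
--         if len(set(theses)) > 1:
--             same_sym_diff = True
--         directions = [e["direction"] for e in entries if e["direction"]]
--         if "long" in directions and any(d in ("short", "bearish", "put") for d in directions):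
--             competing = True
--
--     return same_sym_diff, competing
-- ===== SOURCE B (Python) =====
-- def _detect_symbol_collisions(active_positions: list, thesis_checksums: list) -> tuple[bool, bool]:
--     """
--     Returns (same_symbol_different_thesis, competing_direction).
--     Flat pairwise formulation: build one combined entry list, then each flag is
--     an existence-of-a-pair check over it; no grouping dict at all.
--     """
--     entries = [
--         (pos.get("symbol", ""),
--          pos.get("thesis_type", pos.get("thesis", "")),
--          str(pos.get("direction", pos.get("side", "")) or "").lower())
--         for pos in active_positions
--         if isinstance(pos, dict) and pos.get("symbol", "")
--     ]
--     entries += [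
--         (cs.get("symbol", ""), cs.get("thesis_type", ""), "")
--         for cs in thesis_checksums
--         if isinstance(cs, dict) and cs.get("symbol", "") and cs.get("thesis_type", "")
--         and cs.get("thesis_verdict", "pending") != "closed"
--     ]
--     same_sym_diff = any(
--         s1 == s2 and t1 and t2 and t1 != t2
--         for (s1, t1, _) in entries for (s2, t2, _) in entries)
--     competing = any(
--         s1 == s2 and d1 == "long" and d2 in ("short", "bearish", "put")
--         for (s1, _, d1) in entries for (s2, _, d2) in entries)
--     return same_sym_diff, competing
-- ===== Notes on version B (the rewrite author's own statement) =====
-- stated objective: simpler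
-- what changed: B drops A's symbol-grouping dict and its separate rescan loop: it builds one flat combined entry list (same guards) and computes each flag as a pairwise any-over-pairs existence check.
import Mathlib
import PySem

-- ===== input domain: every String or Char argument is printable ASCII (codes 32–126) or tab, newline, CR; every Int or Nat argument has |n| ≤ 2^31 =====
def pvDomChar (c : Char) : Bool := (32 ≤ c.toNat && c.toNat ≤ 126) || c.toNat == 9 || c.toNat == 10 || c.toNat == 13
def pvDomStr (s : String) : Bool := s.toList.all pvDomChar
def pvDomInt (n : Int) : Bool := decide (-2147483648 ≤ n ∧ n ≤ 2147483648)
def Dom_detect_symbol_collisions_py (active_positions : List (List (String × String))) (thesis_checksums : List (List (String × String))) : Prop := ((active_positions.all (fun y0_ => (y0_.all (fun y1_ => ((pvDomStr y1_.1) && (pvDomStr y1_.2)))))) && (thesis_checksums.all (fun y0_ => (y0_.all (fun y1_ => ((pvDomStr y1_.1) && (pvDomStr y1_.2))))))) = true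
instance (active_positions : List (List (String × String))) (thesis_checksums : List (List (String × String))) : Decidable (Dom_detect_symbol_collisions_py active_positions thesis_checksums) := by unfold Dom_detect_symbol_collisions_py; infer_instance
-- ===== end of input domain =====

-- B replaces A's symbol-grouping dict plus separate rescan by one flat combined entry
-- list over which each flag is a pairwise-existence check (objective: simpler).

-- shared helper: Python's d.get(k, dflt) on an assoc-list dict (first match)
def pvGet (d : List (String × String)) (k dflt : String) : String :=
  (List.lookup k d).getD dflt

-- ===== PORT A =====
def detect_symbol_collisions_py (active_positions : List (List (String × String))) (thesis_checksums : List (List (String × String))) : Bool × Bool :=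
  -- first loop: group position entries {"thesis": t, "direction": d} (ported as the pair (t, d)) by symbol;
  -- 'isinstance(pos, dict)' is always true under the port's type, so the 'continue' branch is dropped;
  -- setdefault(sym, []).append(e) is Dict.modify sym [] (· ++ [e]);
  -- 'str(x or "")' is the identity on the string x (both branches give x back as a string)
  let symbol_theses : PySem.Dict String (List (String × String)) :=
    active_positions.foldl (fun d pos =>
      let sym := pvGet pos "symbol" ""
      let t := pvGet pos "thesis_type" (pvGet pos "thesis" "")
      let direction := PySem.Str.lower (pvGet pos "direction" (pvGet pos "side" ""))
      if sym ≠ "" then d.modify sym [] (fun x => x ++ [(t, direction)]) else d)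
      PySem.Dict.empty
  -- second loop: checksums
  let symbol_theses2 : PySem.Dict String (List (String × String)) :=
    thesis_checksums.foldl (fun d cs =>
      let sym := pvGet cs "symbol" ""
      let t := pvGet cs "thesis_type" ""
      if sym ≠ "" ∧ t ≠ "" ∧ pvGet cs "thesis_verdict" "pending" ≠ "closed"
      then d.modify sym [] (fun x => x ++ [(t, "")]) else d) symbol_theses
  -- third loop: scan the grouped dict, accumulating the two flags
  symbol_theses2.items.foldl (fun fl p =>
    let theses := (p.2.filter (fun e => e.1 ≠ "")).map (fun e => e.1)
    let fl1 := if 1 < (PySem.Set.ofList theses).length then true else fl.1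
    let directions := (p.2.filter (fun e => e.2 ≠ "")).map (fun e => e.2)
    let fl2 := if directions.contains "long" && directions.any (fun dd => dd == "short" || dd == "bearish" || dd == "put") then true else fl.2
    (fl1, fl2)) (false, false)

-- ===== PORT B =====
-- B-side helpers: the two comprehension filters of Source B
def pvEntPos (pos : List (String × String)) : Option (String × String × String) :=
  let sym := pvGet pos "symbol" ""
  if sym ≠ "" then
    some (sym, pvGet pos "thesis_type" (pvGet pos "thesis" ""),
          PySem.Str.lower (pvGet pos "direction" (pvGet pos "side" "")))
  else none

def pvEntCs (cs : List (String × String)) : Option (String × String × String) :=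
  let sym := pvGet cs "symbol" ""
  let t := pvGet cs "thesis_type" ""
  if sym ≠ "" ∧ t ≠ "" ∧ pvGet cs "thesis_verdict" "pending" ≠ "closed"
  then some (sym, t, "") else none

def detect_symbol_collisions_py_alt (active_positions : List (List (String × String))) (thesis_checksums : List (List (String × String))) : Bool × Bool :=
  let entries := active_positions.filterMap pvEntPos ++ thesis_checksums.filterMap pvEntCs
  (entries.any (fun e1 => entries.any (fun e2 =>
      e1.1 == e2.1 && e1.2.1 != "" && e2.2.1 != "" && e1.2.1 != e2.2.1)),
   entries.any (fun e1 => entries.any (fun e2 =>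
      e1.1 == e2.1 && e1.2.2 == "long" && (e2.2.2 == "short" || e2.2.2 == "bearish" || e2.2.2 == "put"))))

-- ===== PRECONDITION & SPEC =====
def Spec_detect_symbol_collisions_py (active_positions : List (List (String × String))) (thesis_checksums : List (List (String × String))) (out : Bool × Bool) : Prop := out = detect_symbol_collisions_py_alt active_positions thesis_checksums
instance (active_positions : List (List (String × String))) (thesis_checksums : List (List (String × String))) (out : Bool × Bool) : Decidable (Spec_detect_symbol_collisions_py active_positions thesis_checksums out) := by unfold Spec_detect_symbol_collisions_py; infer_instance

-- ===== CLAIM (what is proved, stated in full; the proofs are below) =====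
def Claim_equal_detect_symbol_collisions_py : Prop := ∀ (active_positions : List (List (String × String))) (thesis_checksums : List (List (String × String))), Dom_detect_symbol_collisions_py active_positions thesis_checksums → Spec_detect_symbol_collisions_py active_positions thesis_checksums (detect_symbol_collisions_py active_positions thesis_checksums)

-- ===== LEMMAS AND PROOFS =====

lemma pv_foldA1 (l : List (List (String × String))) (d : PySem.Dict String (List (String × String))) :
    l.foldl (fun d pos =>
      let sym := pvGet pos "symbol" ""
      let t := pvGet pos "thesis_type" (pvGet pos "thesis" "")
      let direction := PySem.Str.lower (pvGet pos "direction" (pvGet pos "side" ""))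
      if sym ≠ "" then d.modify sym [] (fun x => x ++ [(t, direction)]) else d) d
    = (l.filterMap pvEntPos).foldl (fun d (e : String × String × String) => d.modify e.1 [] (fun x => x ++ [e.2])) d := by
  rw [List.foldl_filterMap]
  apply PySem.List.foldl_congr_mem
  intro d pos _
  simp only [pvEntPos]
  split <;> rfl

lemma pv_foldA2 (l : List (List (String × String))) (d : PySem.Dict String (List (String × String))) :
    l.foldl (fun d cs =>
      let sym := pvGet cs "symbol" ""
      let t := pvGet cs "thesis_type" ""
      if sym ≠ "" ∧ t ≠ "" ∧ pvGet cs "thesis_verdict" "pending" ≠ "closed"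
      then d.modify sym [] (fun x => x ++ [(t, "")]) else d) d
    = (l.filterMap pvEntCs).foldl (fun d (e : String × String × String) => d.modify e.1 [] (fun x => x ++ [e.2])) d := by
  rw [List.foldl_filterMap]
  apply PySem.List.foldl_congr_mem
  intro d cs _
  simp only [pvEntCs]
  split <;> rfl

-- the flag-accumulating third loop is a pair of List.any
lemma pv_foldFlags {γ : Type} (P Q : γ → Bool) (l : List γ) (b1 b2 : Bool) :
    l.foldl (fun fl p => ((if P p then true else fl.1), (if Q p then true else fl.2))) (b1, b2)
    = (b1 || l.any P, b2 || l.any Q) := by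
  induction l generalizing b1 b2 with
  | nil => simp
  | cons x xs ih =>
    simp only [List.foldl_cons, List.any_cons, ih]
    cases hP : P x <;> cases hQ : Q x <;> simp

-- a deduplicated list has length > 1 iff the original has two distinct members
lemma pv_one_lt_len_ofList (L : List String) :
    1 < (PySem.Set.ofList L).length ↔ ∃ a ∈ L, ∃ b ∈ L, a ≠ b := by
  constructor
  · intro h
    rcases hD : PySem.Set.ofList L with _ | ⟨a, _ | ⟨b, rest⟩⟩ <;> rw [hD] at h <;> simp at h
    have hnd := PySem.Set.nodup_ofList L
    rw [hD] at hnd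
    have hab : a ≠ b := by
      intro hcontra; subst hcontra
      simp [List.nodup_cons] at hnd
    refine ⟨a, ?_, b, ?_, hab⟩
    · rw [← PySem.Set.mem_ofList L a, hD]; simp
    · rw [← PySem.Set.mem_ofList L b, hD]; simp
  · rintro ⟨a, ha, b, hb, hab⟩
    by_contra h
    push Not at h
    interval_cases hlen : (PySem.Set.ofList L).length
    all_goals {
      have ha' : a ∈ PySem.Set.ofList L := (PySem.Set.mem_ofList L a).2 ha
      have hb' : b ∈ PySem.Set.ofList L := (PySem.Set.mem_ofList L b).2 hb
      rcases hD : PySem.Set.ofList L with _ | ⟨x, xs⟩ <;> rw [hD] at ha' hb' hlen <;> simp_all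
    }

-- specialized form of pv_foldFlags for port A's third loop
lemma pv_thirdLoop (l : List (String × List (String × String))) :
    l.foldl (fun fl p =>
      let theses := (p.2.filter (fun e => e.1 ≠ "")).map (fun e => e.1)
      let fl1 := if 1 < (PySem.Set.ofList theses).length then true else fl.1
      let directions := (p.2.filter (fun e => e.2 ≠ "")).map (fun e => e.2)
      let fl2 := if directions.contains "long" && directions.any (fun dd => dd == "short" || dd == "bearish" || dd == "put") then true else fl.2
      (fl1, fl2)) (false, false)
    = (l.any (fun p => decide (1 < (PySem.Set.ofList ((p.2.filter (fun e => e.1 ≠ "")).map (fun e => e.1))).length)),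
       l.any (fun p => ((p.2.filter (fun e => e.2 ≠ "")).map (fun e => e.2)).contains "long" && ((p.2.filter (fun e => e.2 ≠ "")).map (fun e => e.2)).any (fun dd => dd == "short" || dd == "bearish" || dd == "put"))) := by
  have h := pv_foldFlags
      (fun p : String × List (String × String) => decide (1 < (PySem.Set.ofList ((p.2.filter (fun e => e.1 ≠ "")).map (fun e => e.1))).length))
      (fun p : String × List (String × String) => ((p.2.filter (fun e => e.2 ≠ "")).map (fun e => e.2)).contains "long" && ((p.2.filter (fun e => e.2 ≠ "")).map (fun e => e.2)).any (fun dd => dd == "short" || dd == "bearish" || dd == "put"))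
      l false false
  simpa using h

-- flag 1 as a pairwise check over the flat entry list
lemma pv_flag1 (E : List (String × String × String)) :
    (PySem.Set.ofList (E.map (fun e => e.1))).any (fun s =>
      decide (1 < (PySem.Set.ofList ((((E.filter (fun p => p.1 == s)).map (fun p => p.2)).filter (fun e => e.1 ≠ "")).map (fun e => e.1))).length))
    = E.any (fun e1 => E.any (fun e2 =>
      e1.1 == e2.1 && e1.2.1 != "" && e2.2.1 != "" && e1.2.1 != e2.2.1)) := by
  rw [Bool.eq_iff_iff]
  simp only [List.any_eq_true, decide_eq_true_eq, PySem.Set.mem_ofList, List.mem_map,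
    List.mem_filter, pv_one_lt_len_ofList, Bool.and_eq_true, beq_iff_eq, bne_iff_ne, ne_eq,
    decide_eq_true_eq]
  constructor
  · rintro ⟨s, -, a, ⟨ya, ⟨⟨ea, ⟨heaE, hea1⟩, hea2⟩, hya⟩, hyaa⟩, b, ⟨yb, ⟨⟨eb, ⟨hebE, heb1⟩, heb2⟩, hyb⟩, hybb⟩, hab⟩
    refine ⟨ea, heaE, eb, hebE, ⟨⟨?_, ?_⟩, ?_⟩, ?_⟩
    · rw [hea1, heb1]
    · rw [hea2, hyaa]; exact hyaa ▸ hya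
    · rw [heb2, hybb]; exact hybb ▸ hyb
    · rw [hea2, heb2, hyaa, hybb]; exact hab
  · rintro ⟨e1, he1, e2, he2, ⟨⟨h12, h1ne⟩, h2ne⟩, hne⟩
    exact ⟨e1.1, ⟨e1, he1, rfl⟩, e1.2.1, ⟨e1.2, ⟨⟨e1, ⟨he1, rfl⟩, rfl⟩, h1ne⟩, rfl⟩,
      e2.2.1, ⟨e2.2, ⟨⟨e2, ⟨he2, h12.symm⟩, rfl⟩, h2ne⟩, rfl⟩, hne⟩

-- flag 2 as a pairwise check over the flat entry list
lemma pv_flag2 (E : List (String × String × String)) :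
    (PySem.Set.ofList (E.map (fun e => e.1))).any (fun s =>
      ((((E.filter (fun p => p.1 == s)).map (fun p => p.2)).filter (fun e => e.2 ≠ "")).map (fun e => e.2)).contains "long" &&
      (((E.filter (fun p => p.1 == s)).map (fun p => p.2)).filter (fun e => decide (e.2 ≠ ""))).any (fun x => x.2 == "short" || x.2 == "bearish" || x.2 == "put"))
    = E.any (fun e1 => E.any (fun e2 =>
      e1.1 == e2.1 && e1.2.2 == "long" && (e2.2.2 == "short" || e2.2.2 == "bearish" || e2.2.2 == "put"))) := by
  rw [Bool.eq_iff_iff]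
  simp only [List.any_eq_true, List.contains_eq_mem, List.mem_map, List.mem_filter,
    PySem.Set.mem_ofList, Bool.and_eq_true, Bool.or_eq_true, beq_iff_eq, decide_eq_true_eq, ne_eq]
  constructor
  · rintro ⟨s, -, ⟨ya, ⟨⟨ea, ⟨heaE, hea1⟩, hea2⟩, -⟩, hyal⟩, yb, ⟨⟨eb, ⟨hebE, heb1⟩, heb2⟩, -⟩, hybs⟩
    refine ⟨ea, heaE, eb, hebE, ⟨?_, ?_⟩, ?_⟩
    · rw [hea1, heb1]
    · rw [hea2, hyal]
    · rw [heb2]; exact hybs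
  · rintro ⟨e1, he1, e2, he2, ⟨h12, h1l⟩, h2s⟩
    have h1ne : ¬ e1.2.2 = "" := by rw [h1l]; decide
    have h2ne : ¬ e2.2.2 = "" := by
      intro heq
      rw [heq] at h2s
      revert h2s; decide
    exact ⟨e1.1, ⟨e1, he1, rfl⟩, ⟨e1.2, ⟨⟨e1, ⟨he1, rfl⟩, rfl⟩, h1ne⟩, h1l⟩,
      ⟨e2.2, ⟨⟨e2, ⟨he2, h12.symm⟩, rfl⟩, h2ne⟩, h2s⟩⟩

-- ===== VERDICT (by name: the statement is the Claim_ definition above) =====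
theorem detect_symbol_collisions_py_spec : Claim_equal_detect_symbol_collisions_py := by
  intro ap tc _
  unfold Spec_detect_symbol_collisions_py
  simp only [detect_symbol_collisions_py, detect_symbol_collisions_py_alt]
  rw [pv_foldA1, pv_foldA2, ← List.foldl_append]
  generalize (ap.filterMap pvEntPos ++ tc.filterMap pvEntCs : List (String × String × String)) = E
  have hnd : ((E.foldl (fun d (e : String × String × String) => d.modify e.1 [] (fun x => x ++ [e.2])) PySem.Dict.empty).keys).Nodup := by
    exact PySem.Dict.nodup_keys_foldl_modify_key E (fun e => e.1) [] (fun _ e x => x ++ [e.2]) PySem.Dict.empty (by simp [pysem])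
  have hkeys : (E.foldl (fun d (e : String × String × String) => d.modify e.1 [] (fun x => x ++ [e.2])) PySem.Dict.empty).keys = PySem.Set.ofList (E.map (fun e => e.1)) := by
    rw [PySem.Dict.keys_foldl_modify_key E (fun e => e.1) [] (fun _ e x => x ++ [e.2]) PySem.Dict.empty]
    simp only [pysem]
    rw [← List.foldl_map]
    rfl
  have hget : ∀ s, (E.foldl (fun d (e : String × String × String) => d.modify e.1 [] (fun x => x ++ [e.2])) PySem.Dict.empty).getD s [] = (E.filter (fun p => p.1 == s)).map (fun p => p.2) := by
    intro s
    rw [PySem.Dict.getD_foldl_modify_append E PySem.Dict.empty s]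
    simp [pysem]
  rw [PySem.Dict.items_eq_map_keys _ hnd [], pv_thirdLoop]
  simp only [List.any_map, Function.comp_def, hget, hkeys]
  rw [pv_flag1, pv_flag2]
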